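-- pv_equiv track=rewrite | github.com/minecraftmuselk/Math | ProjectEuler/Probs 41-60/problem_47.py | find_consecutive_numbers_with_prime_factors
-- ===== SOURCE A (Python) =====
-- def prime_factors_count(n):
--     factors = set( )
--     divisor = 2
--     while n > 1:
--         while n % divisor == 0:
--             factors.add(divisor)
--             n //= divisor
--         divisor += 1
--         if divisor * divisor > n:
--             if n > 1:
--                 factors.add(n)
--             break
--     return len(factors)
--
-- def find_consecutive_numbers_with_prime_factors(limit):
--     consecutive_count = 0
--     i = 2
--     while True:
--         if prime_factors_count(i) == 4:
--             consecutive_count += 1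
--             if consecutive_count == 4:
--                 return i - 3  # First number in the sequence
--         else:
--             consecutive_count = 0
--         i += 1
-- ===== SOURCE B (Python) =====
-- def omega(n):
--     # number of distinct prime factors, standard trial division
--     count = 0
--     d = 2
--     while d * d <= n:
--         if n % d == 0:
--             count += 1
--             while n % d == 0:
--                 n //= d
--         d += 1
--     if n > 1:
--         count += 1
--     return count
--
-- def find_consecutive_numbers_with_prime_factors(limit):
--     n = 2
--     while not (omega(n) == 4 and omega(n + 1) == 4
--                and omega(n + 2) == 4 and omega(n + 3) == 4):
--         n += 1
--     return n
-- ===== Notes on version B (the rewrite author's own statement) =====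
-- stated objective: simpler
-- what changed: Replaces A's running streak-counter over single numbers and its set-accumulating factorization loop with a mid-loop break by a direct search for the first n whose whole 4-window passes, using the standard d*d<=n trial-division counter with an integer count.
import Mathlib
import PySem

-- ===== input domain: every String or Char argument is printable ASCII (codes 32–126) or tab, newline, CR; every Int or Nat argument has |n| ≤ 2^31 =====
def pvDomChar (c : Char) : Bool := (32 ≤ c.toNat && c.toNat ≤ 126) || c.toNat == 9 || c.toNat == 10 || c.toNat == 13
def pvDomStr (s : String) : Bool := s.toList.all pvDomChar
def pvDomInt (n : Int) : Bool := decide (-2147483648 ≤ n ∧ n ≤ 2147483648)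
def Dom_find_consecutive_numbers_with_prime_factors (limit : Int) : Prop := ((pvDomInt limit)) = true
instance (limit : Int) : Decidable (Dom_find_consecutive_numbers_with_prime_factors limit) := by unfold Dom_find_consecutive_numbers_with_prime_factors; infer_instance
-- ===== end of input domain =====

-- B replaces A's streak counter and set-based factorization (with its mid-loop break) by a direct
-- search for the first n whose 4-window all have exactly 4 distinct prime factors (objective: simpler).
-- Both programs ignore `limit`. All integers involved are nonnegative, so the ports work over Nat
-- (Python's //, % coincide with Nat division/mod there); the unbounded `while True` loops are ported
-- with a fuel counter far beyond the point where the Python returns (a totality guard only).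

-- ===== PORT A =====
-- inner `while n % divisor == 0: factors.add(divisor); n //= divisor` (fuel ≥ n suffices: n shrinks)
def pfcStrip (fuel : Nat) (n divisor : Nat) (factors : PySem.Set Nat) : Nat × PySem.Set Nat :=
  match fuel with
  | 0 => (n, factors)
  | fuel + 1 =>
    if n % divisor == 0 then
      pfcStrip fuel (n / divisor) divisor (PySem.Set.add factors divisor)
    else (n, factors)

-- outer `while n > 1:` loop of prime_factors_count (fuel ≥ n + 2 suffices: divisor grows each turn)
def pfcLoop (fuel : Nat) (n divisor : Nat) (factors : PySem.Set Nat) : PySem.Set Nat :=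
  match fuel with
  | 0 => factors
  | fuel + 1 =>
    if n > 1 then
      match pfcStrip n n divisor factors with
      | (n, factors) =>
        let divisor := divisor + 1
        if divisor * divisor > n then
          (if n > 1 then PySem.Set.add factors n else factors)
        else pfcLoop fuel n divisor factors
    else factors

def prime_factors_count (n : Nat) : Nat :=
  (pfcLoop (n + 2) n 2 PySem.Set.empty).length

-- `while True:` search loop of A; returns i - 3 on success, 0 on fuel exhaustion (never reached:
-- the Python returns at i = 134046 < 2000003)
def scanA (fuel : Nat) (consecutive_count i : Nat) : Nat :=
  match fuel with
  | 0 => 0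
  | fuel + 1 =>
    if prime_factors_count i == 4 then
      if consecutive_count + 1 == 4 then i - 3
      else scanA fuel (consecutive_count + 1) (i + 1)
    else scanA fuel 0 (i + 1)

def find_consecutive_numbers_with_prime_factors (limit : Int) : Int :=
  ((scanA 2000003 0 2 : Nat) : Int)

-- ===== PORT B =====
-- inner `while n % d == 0: n //= d` of omega
def omegaStrip (fuel : Nat) (n d : Nat) : Nat :=
  match fuel with
  | 0 => n
  | fuel + 1 => if n % d == 0 then omegaStrip fuel (n / d) d else n

-- `while d * d <= n:` loop of omega
def omegaLoop (fuel : Nat) (n d count : Nat) : Nat :=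
  match fuel with
  | 0 => count
  | fuel + 1 =>
    if d * d ≤ n then
      if n % d == 0 then omegaLoop fuel (omegaStrip n n d) (d + 1) (count + 1)
      else omegaLoop fuel n (d + 1) count
    else count + (if n > 1 then 1 else 0)

def omegaB (n : Nat) : Nat := omegaLoop (n + 2) n 2 0

-- `while not (omega(n) == 4 and ... and omega(n+3) == 4): n += 1` (fuel guard as in A's port)
def scanB (fuel : Nat) (n : Nat) : Nat :=
  match fuel with
  | 0 => 0
  | fuel + 1 =>
    if omegaB n == 4 && omegaB (n + 1) == 4 && omegaB (n + 2) == 4 && omegaB (n + 3) == 4 then n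
    else scanB fuel (n + 1)

def find_consecutive_numbers_with_prime_factors_alt (limit : Int) : Int :=
  ((scanB 2000000 2 : Nat) : Int)

-- ===== PRECONDITION & SPEC =====
def Spec_find_consecutive_numbers_with_prime_factors (limit : Int) (out : Int) : Prop := out = find_consecutive_numbers_with_prime_factors_alt limit
instance (limit : Int) (out : Int) : Decidable (Spec_find_consecutive_numbers_with_prime_factors limit out) := by unfold Spec_find_consecutive_numbers_with_prime_factors; infer_instance

-- ===== CLAIM (what is proved, stated in full; the proofs are below) =====
def Claim_equal_find_consecutive_numbers_with_prime_factors : Prop := ∀ (limit : Int), Dom_find_consecutive_numbers_with_prime_factors limit → Spec_find_consecutive_numbers_with_prime_factors limit (find_consecutive_numbers_with_prime_factors limit)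

-- ===== LEMMAS AND PROOFS =====

-- "all prime factors of n are at least d"
def MinFacGE (n d : Nat) : Prop := ∀ p, p.Prime → p ∣ n → d ≤ p

lemma minFacGE_two (n : Nat) : MinFacGE n 2 := fun p hp _ => hp.two_le

lemma prime_of_dvd_minFacGE {n d : Nat} (hd : 2 ≤ d)
    (hinv : MinFacGE n d) (hdvd : d ∣ n) : d.Prime := by
  have hp := Nat.minFac_prime (show d ≠ 1 by omega)
  have h1 : d.minFac ∣ n := (Nat.minFac_dvd d).trans hdvd
  have h2 := hinv _ hp h1
  have h3 := Nat.minFac_le (show 0 < d by omega)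
  have h4 : d.minFac = d := by omega
  rwa [← h4]

lemma prime_of_sq_gt {n d : Nat} (hn : 1 < n) (hinv : MinFacGE n d) (hsq : n < d * d) :
    n.Prime := by
  by_contra hnp
  have h2 := Nat.minFac_sq_le_self (show 0 < n by omega) hnp
  have hp := Nat.minFac_prime (show n ≠ 1 by omega)
  have hge := hinv _ hp (Nat.minFac_dvd n)
  have hmul : d * d ≤ n.minFac * n.minFac := Nat.mul_le_mul hge hge
  rw [pow_two] at h2
  omega

-- A's inner strip loop: set component, returned value, and its prime factors
lemma pfcStrip_spec : ∀ n fuel d (facts : PySem.Set Nat), 2 ≤ d → 1 ≤ n → n ≤ fuel →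
    (pfcStrip fuel n d facts).2 = (if d ∣ n then PySem.Set.add facts d else facts) ∧
    (pfcStrip fuel n d facts).1 ∣ n ∧ ¬ d ∣ (pfcStrip fuel n d facts).1 ∧
    1 ≤ (pfcStrip fuel n d facts).1 ∧
    (¬ d ∣ n → (pfcStrip fuel n d facts).1 = n) ∧
    (d.Prime → ((pfcStrip fuel n d facts).1).primeFactors = n.primeFactors \ {d}) := by
  intro n
  induction n using Nat.strong_induction_on with
  | _ n ih =>
    intro fuel d facts hd hn hfuel
    cases fuel with
    | zero => omega
    | succ fuel =>
      by_cases hdvd : d ∣ n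
      · have hmod : (n % d == 0) = true := by
          simp [Nat.mod_eq_zero_of_dvd hdvd]
        have hlt : n / d < n := Nat.div_lt_self (by omega) (by omega)
        have hdn : d ≤ n := Nat.le_of_dvd (by omega) hdvd
        have hpos : 1 ≤ n / d := (Nat.one_le_div_iff (by omega)).mpr hdn
        have hfuel' : n / d ≤ fuel := by omega
        obtain ⟨hset, hr1, hr2, hr3, hr4, hr5⟩ :=
          ih (n / d) hlt fuel d (PySem.Set.add facts d) hd hpos hfuel'
        have hstep : pfcStrip (fuel + 1) n d facts
            = pfcStrip fuel (n / d) d (PySem.Set.add facts d) := by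
          simp [pfcStrip, hmod]
        rw [hstep]
        have hdivdvd : n / d ∣ n := Nat.div_dvd_of_dvd hdvd
        refine ⟨?_, hr1.trans hdivdvd, hr2, hr3, fun h => absurd hdvd h, ?_⟩
        · rw [hset, if_pos hdvd]
          split
          · exact PySem.Set.add_of_mem (by simp [PySem.Set.mem_add])
          · rfl
        · intro hdp
          rw [hr5 hdp]
          have hmul : d * (n / d) = n := Nat.mul_div_cancel' hdvd
          have hpf : n.primeFactors = {d} ∪ (n / d).primeFactors := by
            conv_lhs => rw [← hmul]
            rw [Nat.primeFactors_mul (by omega) (by omega), hdp.primeFactors]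
          rw [hpf, Finset.union_sdiff_distrib, Finset.sdiff_self, Finset.empty_union]
      · have hmod : (n % d == 0) = false := by
          simp only [beq_eq_false_iff_ne, ne_eq]
          intro h
          exact hdvd (Nat.dvd_iff_mod_eq_zero.mpr h)
        have hstep : pfcStrip (fuel + 1) n d facts = (n, facts) := by
          simp [pfcStrip, hmod]
        rw [hstep]
        refine ⟨by simp [hdvd], dvd_rfl, hdvd, hn, fun _ => rfl, fun hdp => ?_⟩
        have : d ∉ n.primeFactors := fun h => hdvd (Nat.mem_primeFactors.mp h).2.1
        rw [← Finset.erase_eq, Finset.erase_eq_self.mpr this]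

-- B's inner strip loop: same returned value
lemma omegaStrip_spec : ∀ n fuel d, 2 ≤ d → 1 ≤ n → n ≤ fuel →
    omegaStrip fuel n d ∣ n ∧ ¬ d ∣ omegaStrip fuel n d ∧ 1 ≤ omegaStrip fuel n d ∧
    (d.Prime → (omegaStrip fuel n d).primeFactors = n.primeFactors \ {d}) := by
  intro n
  induction n using Nat.strong_induction_on with
  | _ n ih =>
    intro fuel d hd hn hfuel
    cases fuel with
    | zero => omega
    | succ fuel =>
      by_cases hdvd : d ∣ n
      · have hmod : (n % d == 0) = true := by
          simp [Nat.mod_eq_zero_of_dvd hdvd]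
        have hlt : n / d < n := Nat.div_lt_self (by omega) (by omega)
        have hdn : d ≤ n := Nat.le_of_dvd (by omega) hdvd
        have hpos : 1 ≤ n / d := (Nat.one_le_div_iff (by omega)).mpr hdn
        obtain ⟨hr1, hr2, hr3, hr5⟩ := ih (n / d) hlt fuel d hd hpos (by omega)
        have hstep : omegaStrip (fuel + 1) n d = omegaStrip fuel (n / d) d := by
          simp [omegaStrip, hmod]
        rw [hstep]
        refine ⟨hr1.trans (Nat.div_dvd_of_dvd hdvd), hr2, hr3, fun hdp => ?_⟩
        rw [hr5 hdp]
        have hmul : d * (n / d) = n := Nat.mul_div_cancel' hdvd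
        have hpf : n.primeFactors = {d} ∪ (n / d).primeFactors := by
          conv_lhs => rw [← hmul]
          rw [Nat.primeFactors_mul (by omega) (by omega), hdp.primeFactors]
        rw [hpf, Finset.union_sdiff_distrib, Finset.sdiff_self, Finset.empty_union]
      · have hmod : (n % d == 0) = false := by
          simp only [beq_eq_false_iff_ne, ne_eq]
          intro h
          exact hdvd (Nat.dvd_iff_mod_eq_zero.mpr h)
        have hstep : omegaStrip (fuel + 1) n d = n := by
          simp [omegaStrip, hmod]
        rw [hstep]
        refine ⟨dvd_rfl, hdvd, hn, fun hdp => ?_⟩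
        have : d ∉ n.primeFactors := fun h => hdvd (Nat.mem_primeFactors.mp h).2.1
        rw [← Finset.erase_eq, Finset.erase_eq_self.mpr this]

-- invariant transport to the next divisor
lemma minFacGE_succ {n r d : Nat} (hinv : MinFacGE n d) (hr : r ∣ n) (hnd : ¬ d ∣ r) :
    MinFacGE r (d + 1) := by
  intro p hp hpr
  have h1 := hinv p hp (hpr.trans hr)
  rcases Nat.lt_or_ge p (d + 1) with h | h
  · have : p = d := by omega
    exact absurd (this ▸ hpr) hnd
  · exact h

lemma pfcLoop_len : ∀ fuel n d (facts : PySem.Set Nat), 1 ≤ n → 2 ≤ d →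
    n + 2 ≤ fuel + d → MinFacGE n d → (∀ x ∈ facts, x < d) → facts.Nodup →
    (pfcLoop fuel n d facts).length = facts.length + n.primeFactors.card := by
  intro fuel
  induction fuel with
  | zero =>
    intro n d facts hn hd hfuel hinv _ _
    have hn1 : n = 1 := by
      by_contra h
      have hp := Nat.minFac_prime h
      have := hinv _ hp (Nat.minFac_dvd n)
      have := Nat.minFac_le (show 0 < n by omega)
      omega
    subst hn1
    simp [pfcLoop, Nat.primeFactors_one]
  | succ fuel ih =>
    intro n d facts hn hd hfuel hinv hbnd hnd
    by_cases h1 : 1 < n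
    · rcases hsp : pfcStrip n n d facts with ⟨r, fs⟩
      obtain ⟨hset, hrdvd, hrnd, hrpos, hrid, hrpf⟩ :=
        pfcStrip_spec n n d facts hd (by omega) le_rfl
      rw [hsp] at hset hrdvd hrnd hrpos hrid hrpf
      simp only at hset hrdvd hrnd hrpos hrid hrpf
      have hstep : pfcLoop (fuel + 1) n d facts =
          (if (d + 1) * (d + 1) > r then
            (if r > 1 then PySem.Set.add fs r else fs)
          else pfcLoop fuel r (d + 1) fs) := by
        simp only [pfcLoop, if_pos h1, hsp]
      rw [hstep]
      have hinvr : MinFacGE r (d + 1) := minFacGE_succ hinv hrdvd hrnd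
      have hrn : r ≤ n := Nat.le_of_dvd (by omega) hrdvd
      -- counting: facts/fs lengths, primeFactors cards
      have hkey : fs.length = facts.length + (if d ∣ n then 1 else 0) ∧
          n.primeFactors.card = r.primeFactors.card + (if d ∣ n then 1 else 0) ∧
          (∀ x ∈ fs, x < d + 1) ∧ fs.Nodup := by
        by_cases hdvd : d ∣ n
        · have hdp : d.Prime := prime_of_dvd_minFacGE hd hinv hdvd
          have hpfr := hrpf hdp
          have hdin : d ∈ n.primeFactors := Nat.mem_primeFactors.mpr ⟨hdp, hdvd, by omega⟩
          have hcpos : 0 < n.primeFactors.card := Finset.card_pos.mpr ⟨d, hdin⟩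
          have hcard : r.primeFactors.card = n.primeFactors.card - 1 := by
            rw [hpfr, ← Finset.erase_eq, Finset.card_erase_of_mem hdin]
          have hdnotin : d ∉ facts := fun h => absurd (hbnd d h) (by omega)
          have hfs : fs = facts ++ [d] := by
            rw [hset, if_pos hdvd, PySem.Set.add_of_not_mem hdnotin]
          constructor
          · simp [hfs, hdvd]
          constructor
          · simp [hdvd]; omega
          constructor
          · intro x hx
            rw [hfs] at hx
            rcases List.mem_append.mp hx with h | h
            · exact lt_trans (hbnd x h) (by omega)
            · simp at h; omega
          · rw [hfs]
            refine List.nodup_append.mpr ⟨hnd, List.nodup_singleton d, ?_⟩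
            intro x hx y hy
            rw [List.mem_singleton] at hy
            subst hy
            exact fun hxy => hdnotin (hxy ▸ hx)
        · have hfs : fs = facts := by rw [hset, if_neg hdvd]
          have hr : r = n := hrid hdvd
          refine ⟨by simp [hfs, hdvd], by simp [hdvd, hr], ?_, by rw [hfs]; exact hnd⟩
          intro x hx
          rw [hfs] at hx
          exact lt_trans (hbnd x hx) (by omega)
      obtain ⟨hlen, hcard, hbnd', hnd'⟩ := hkey
      by_cases hbr : (d + 1) * (d + 1) > r
      · rw [if_pos hbr]
        by_cases hr1 : r > 1
        · rw [if_pos hr1]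
          have hrp : r.Prime := prime_of_sq_gt hr1 hinvr hbr
          have hrcard : r.primeFactors.card = 1 := by rw [hrp.primeFactors]; rfl
          have hrge : d + 1 ≤ r := hinvr r hrp dvd_rfl
          have hrnotin : r ∉ fs := fun h => absurd (hbnd' r h) (by omega)
          rw [PySem.Set.add_of_not_mem hrnotin]
          simp only [List.length_append, List.length_singleton]
          omega
        · rw [if_neg hr1]
          have hr : r = 1 := by omega
          rw [hr] at hcard
          simp [Nat.primeFactors_one] at hcard
          omega
      · rw [if_neg hbr]
        have := ih r (d + 1) fs hrpos (by omega) (by omega) hinvr hbnd' hnd'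
        omega
    · have hn1 : n = 1 := by omega
      subst hn1
      simp [pfcLoop, Nat.primeFactors_one]

lemma omegaLoop_spec : ∀ fuel n d count, 1 ≤ n → 2 ≤ d →
    n + 2 ≤ fuel + d → MinFacGE n d →
    omegaLoop fuel n d count = count + n.primeFactors.card := by
  intro fuel
  induction fuel with
  | zero =>
    intro n d count hn hd hfuel hinv
    have hn1 : n = 1 := by
      by_contra h
      have hp := Nat.minFac_prime h
      have := hinv _ hp (Nat.minFac_dvd n)
      have := Nat.minFac_le (show 0 < n by omega)
      omega
    subst hn1
    simp [omegaLoop, Nat.primeFactors_one]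
  | succ fuel ih =>
    intro n d count hn hd hfuel hinv
    by_cases hdd : d * d ≤ n
    · by_cases hdvd : d ∣ n
      · have hmod : (n % d == 0) = true := by simp [Nat.mod_eq_zero_of_dvd hdvd]
        have hstep : omegaLoop (fuel + 1) n d count
            = omegaLoop fuel (omegaStrip n n d) (d + 1) (count + 1) := by
          simp [omegaLoop, hdd, hmod]
        rw [hstep]
        obtain ⟨hrdvd, hrnd, hrpos, hrpf⟩ := omegaStrip_spec n n d hd (by omega) le_rfl
        have hdp : d.Prime := prime_of_dvd_minFacGE hd hinv hdvd
        have hdin : d ∈ n.primeFactors := Nat.mem_primeFactors.mpr ⟨hdp, hdvd, by omega⟩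
        have hcpos : 0 < n.primeFactors.card := Finset.card_pos.mpr ⟨d, hdin⟩
        have hcard : (omegaStrip n n d).primeFactors.card = n.primeFactors.card - 1 := by
          rw [hrpf hdp, ← Finset.erase_eq, Finset.card_erase_of_mem hdin]
        have hinvr : MinFacGE (omegaStrip n n d) (d + 1) := minFacGE_succ hinv hrdvd hrnd
        have hrn : omegaStrip n n d ≤ n := Nat.le_of_dvd (by omega) hrdvd
        rw [ih (omegaStrip n n d) (d + 1) (count + 1) hrpos (by omega) (by omega) hinvr]
        omega
      · have hmod : (n % d == 0) = false := by
          simp only [beq_eq_false_iff_ne, ne_eq]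
          intro h
          exact hdvd (Nat.dvd_iff_mod_eq_zero.mpr h)
        have hstep : omegaLoop (fuel + 1) n d count = omegaLoop fuel n (d + 1) count := by
          simp [omegaLoop, hdd, hmod]
        rw [hstep]
        have hinvr : MinFacGE n (d + 1) := by
          intro p hp hpn
          have := hinv p hp hpn
          rcases Nat.lt_or_ge p (d + 1) with h | h
          · have : p = d := by omega
            exact absurd (this ▸ hpn) hdvd
          · exact h
        exact ih n (d + 1) count hn (by omega) (by omega) hinvr
    · have hstep : omegaLoop (fuel + 1) n d count = count + (if n > 1 then 1 else 0) := by
        simp [omegaLoop, hdd]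
      rw [hstep]
      by_cases h1 : n > 1
      · have hnp : n.Prime := prime_of_sq_gt h1 hinv (by omega)
        rw [if_pos h1, hnp.primeFactors]
        rfl
      · have hn1 : n = 1 := by omega
        subst hn1
        simp [Nat.primeFactors_one]

lemma omegaB_eq_pfc (n : Nat) : omegaB n = prime_factors_count n := by
  rcases Nat.eq_zero_or_pos n with h | h
  · subst h; decide
  · unfold omegaB prime_factors_count
    rw [omegaLoop_spec (n + 2) n 2 0 h (by omega) (by omega) (minFacGE_two n)]
    rw [pfcLoop_len (n + 2) n 2 PySem.Set.empty h (by omega) (by omega) (minFacGE_two n)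
      (by intro x hx; simp [PySem.Set.empty] at hx) (by simp [PySem.Set.empty])]
    simp [PySem.Set.empty]

-- with fewer than 4 steps of fuel and a zero streak, A's scan cannot return a value
lemma scanA_dead : ∀ fuel cc i, fuel + cc ≤ 3 → scanA fuel cc i = 0 := by
  intro fuel
  induction fuel with
  | zero => intro cc i _; rfl
  | succ fuel ih =>
    intro cc i hle
    have hne : (cc + 1 == 4) = false := by
      simp only [beq_eq_false_iff_ne, ne_eq]; omega
    cases hc : (prime_factors_count i == 4)
    · simp only [scanA, hc, Bool.false_eq_true, if_false]
      exact ih 0 (i + 1) (by omega)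
    · simp only [scanA, hc, if_true, hne, Bool.false_eq_true, if_false]
      exact ih (cc + 1) (i + 1) (by omega)

-- if position m + d (d ≤ 3) fails, B's scan skips straight past it
lemma scanB_skip : ∀ g d m, d ≤ 3 → (prime_factors_count (m + d) == 4) = false →
    scanB g m = if d + 1 ≤ g then scanB (g - (d + 1)) (m + (d + 1)) else 0 := by
  intro g
  induction g with
  | zero =>
    intro d m _ _
    simp [scanB]
  | succ g ih =>
    intro d m hd hbad
    have hcomp : (omegaB (m + d) == 4) = false := by rw [omegaB_eq_pfc]; exact hbad
    have hcond : (omegaB m == 4 && omegaB (m + 1) == 4 && omegaB (m + 2) == 4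
        && omegaB (m + 3) == 4) = false := by
      interval_cases d <;> simp_all
    have hstep : scanB (g + 1) m = scanB g (m + 1) := by
      simp only [scanB, hcond, Bool.false_eq_true, if_false]
    rw [hstep]
    cases d with
    | zero =>
      rw [if_pos (by omega)]
      congr 1
    | succ d =>
      have hbad' : (prime_factors_count ((m + 1) + d) == 4) = false := by
        rw [show (m + 1) + d = m + (d + 1) by omega]; exact hbad
      rw [ih d (m + 1) (by omega) hbad']
      by_cases hg : d + 1 ≤ g
      · rw [if_pos hg, if_pos (by omega)]
        congr 1 <;> omega
      · rw [if_neg hg, if_neg (by omega)]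

-- the two scan loops agree, with A given exactly 3 more fuel (one per member of the final window)
lemma scan_main : ∀ g k m, k ≤ 3 →
    (∀ j, j < 3 - k → (prime_factors_count (m + j) == 4) = true) →
    scanA (g + k) (3 - k) (m + (3 - k)) = scanB g m := by
  intro g
  induction g using Nat.strong_induction_on with
  | _ g IH =>
    intro k
    induction k with
    | zero =>
      intro m _ hwin
      cases g with
      | zero => rfl
      | succ g =>
        have h0 := hwin 0 (by omega)
        have h1 := hwin 1 (by omega)
        have h2 := hwin 2 (by omega)
        rw [Nat.add_zero] at h0
        cases hc : (prime_factors_count (m + 3) == 4)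
        · have hstep : scanA (g + 1 + 0) (3 - 0) (m + (3 - 0)) = scanA g 0 (m + 3 + 1) := by
            simp only [Nat.sub_zero, scanA, hc, Bool.false_eq_true, if_false]
          rw [hstep, scanB_skip (g + 1) 3 m (by omega) (by simp [hc])]
          by_cases hg : 4 ≤ g + 1
          · rw [if_pos hg]
            have hIH := IH (g + 1 - 4) (by omega) 3 (m + 4) (by omega) (by omega)
            norm_num at hIH
            rw [show m + 3 + 1 = m + 4 by omega, ← hIH]
            congr 1
            omega
          · rw [if_neg hg]
            exact scanA_dead g 0 (m + 3 + 1) (by omega)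
        · have hstep : scanA (g + 1 + 0) (3 - 0) (m + (3 - 0)) = m := by
            simp only [Nat.sub_zero, scanA, hc, if_true,
              show ((3:Nat) + 1 == 4) = true from rfl]
            omega
          rw [hstep]
          have hcond : (omegaB m == 4 && omegaB (m + 1) == 4 && omegaB (m + 2) == 4
              && omegaB (m + 3) == 4) = true := by
            simp only [omegaB_eq_pfc, h0, h1, h2, hc, Bool.and_self]
          simp only [scanB, hcond, if_true]
    | succ k ihk =>
      intro m hk hwin
      have hk' : k ≤ 2 := by omega
      have hs1 : 3 - (k + 1) = 2 - k := by omega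
      cases hc : (prime_factors_count (m + (2 - k)) == 4)
      · -- window member fails: both scans restart past it
        have hstep : scanA (g + (k + 1)) (3 - (k + 1)) (m + (3 - (k + 1)))
            = scanA (g + k) 0 (m + (2 - k) + 1) := by
          rw [hs1, show g + (k + 1) = (g + k) + 1 by omega]
          simp only [scanA, hc, Bool.false_eq_true, if_false]
        rw [hstep, scanB_skip g (2 - k) m (by omega) hc]
        by_cases hg : 3 - k ≤ g
        · rw [if_pos (by omega)]
          have hIH := IH (g - (3 - k)) (by omega) 3 (m + (3 - k)) (by omega) (by omega)
          norm_num at hIH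
          rw [show m + (2 - k) + 1 = m + (3 - k) by omega,
            show m + (2 - k + 1) = m + (3 - k) by omega,
            show g - (2 - k + 1) = g - (3 - k) by omega, ← hIH]
          congr 1
          omega
        · rw [if_neg (by omega)]
          exact scanA_dead (g + k) 0 (m + (2 - k) + 1) (by omega)
      · -- window member passes: extend the streak
        have hne : (2 - k + 1 == 4) = false := by
          simp only [beq_eq_false_iff_ne, ne_eq]; omega
        have hstep : scanA (g + (k + 1)) (3 - (k + 1)) (m + (3 - (k + 1)))
            = scanA (g + k) (3 - k) (m + (3 - k)) := by
          rw [hs1, show g + (k + 1) = (g + k) + 1 by omega]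
          simp only [scanA, hc, if_true, hne, Bool.false_eq_true, if_false]
          congr 1 <;> omega
        rw [hstep]
        exact ihk m (by omega) (by
          intro j hj
          rcases Nat.lt_or_ge j (2 - k) with h | h
          · exact hwin j (by omega)
          · have : j = 2 - k := by omega
            rw [this]; exact hc)

-- ===== VERDICT (by name: the statement is the Claim_ definition above) =====
theorem find_consecutive_numbers_with_prime_factors_spec : Claim_equal_find_consecutive_numbers_with_prime_factors := by
  intro limit _
  show _ = _
  unfold find_consecutive_numbers_with_prime_factors find_consecutive_numbers_with_prime_factors_alt
  have h := scan_main 2000000 3 2 (by omega) (by omega)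
  norm_num at h
  rw [h]
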